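/-
  GENERATED by c/gen_globals.py from c/GLOBALS.txt — do not edit; re-run the script when the image is rebuilt.

  The 6 globals registered with the sanitizer: the descriptor table at 0x1217c0 (what `_sub_I_65535_1` passes to
  `__asan_register_globals`), `.init_array`, and the evaluated facts `ShadowOK.register` asks for.
-/
import Asan.Runtime
namespace Vorbis.Globals
open Asan

/-- The address of the descriptor table (`.data..LASAN0`): the constructor's `edi`. -/
def table : Nat := 0x1217c0

/-- The number of descriptors: the constructor's `esi`. -/
def count : Nat := 6

/-- `vorbis`: 6 bytes at 0x121600, slot of 64 bytes (red zone [0x121606, 0x121640)); descriptor at 0x1217c0. -/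
def vorbis : GlobalDesc := ⟨0x121600, 6, 64⟩

/-- `range_list`: 16 bytes at 0x120600, slot of 64 bytes (red zone [0x120610, 0x120640)); descriptor at 0x121800. -/
def range_list : GlobalDesc := ⟨0x120600, 16, 64⟩

/-- `log2_4`: 16 bytes at 0x120640, slot of 64 bytes (red zone [0x120650, 0x120680)); descriptor at 0x121840. -/
def log2_4 : GlobalDesc := ⟨0x120640, 16, 64⟩

/-- `inverse_db_table`: 1024 bytes at 0x120680, slot of 1056 bytes (red zone [0x120a80, 0x120aa0)); descriptor at 0x121880. -/
def inverse_db_table : GlobalDesc := ⟨0x120680, 1024, 1056⟩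

/-- `ogg_page_header`: 4 bytes at 0x120ac0, slot of 64 bytes (red zone [0x120ac4, 0x120b00)); descriptor at 0x1218c0. -/
def ogg_page_header : GlobalDesc := ⟨0x120ac0, 4, 64⟩

/-- `crc_table`: 1024 bytes at 0x121c00, slot of 1056 bytes (red zone [0x122000, 0x122020)); descriptor at 0x121900. -/
def crc_table : GlobalDesc := ⟨0x121c00, 1024, 1056⟩

/-- The table, in table order. -/
def descs : List GlobalDesc := [vorbis, range_list, log2_4, inverse_db_table, ogg_page_header, crc_table]

/-- `.init_array`: (address of the entry, its value). -/
def initArray : List (Nat × Nat) := [(0x121500, 0x1038a0)]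

/-- The table has `count` descriptors. -/
theorem descs_length : descs.length = count := by decide

/-- Every descriptor is sane: 8-aligned slot, a whole number of granules, containing the global, inside the image. -/
theorem descs_ok : ∀ d, d ∈ descs → d.OK := by decide

/-- The slots are pairwise apart. -/
theorem descs_apart : descs.Pairwise GlobalDesc.Apart := by decide

/-- The objects `ShadowOK.register` adds for this table (reverse table order). -/
def objs : List Obj := (descs.map GlobalDesc.obj).reverse

/-- The runtime of this image, for the runtime symbols `S` (`Vorbis.Symbols.rt`). -/
def runtime (S : RtSymbols) : Runtime := ⟨S, table, descs⟩

end Vorbis.Globals
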